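-- pv_equiv track=rewrite | github.com/GuitarYourself/batch-face | batch_face/fast_alignment/predictor.py | split_feeds
-- ===== SOURCE A (Python) =====
-- def split_feeds(all_feeds, all_faces):
--     counts = [len(faces) for faces in all_faces]
--     sum_now = 0
--     ends = [0]
--     for i in range(len(counts)):
--         sum_now += counts[i]
--         end = sum_now
--         ends.append(end)
--     return [all_feeds[ends[i - 1] : ends[i]] for i in range(1, len(ends))]
-- ===== SOURCE B (Python) =====
-- def split_feeds(all_feeds, all_faces):
--     it = iter(all_feeds)
--     return [[feed for _, feed in zip(faces, it)] for faces in all_faces]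
-- ===== Notes on version B (the rewrite author's own statement) =====
-- stated objective: alternative
-- what changed: B keeps no offsets or slices at all: instead of A's prefix-sum table and index-based slicing, B pairs each face group with a single iterator over the feeds via zip, so the iterator's position replaces all index arithmetic.
import Mathlib
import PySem

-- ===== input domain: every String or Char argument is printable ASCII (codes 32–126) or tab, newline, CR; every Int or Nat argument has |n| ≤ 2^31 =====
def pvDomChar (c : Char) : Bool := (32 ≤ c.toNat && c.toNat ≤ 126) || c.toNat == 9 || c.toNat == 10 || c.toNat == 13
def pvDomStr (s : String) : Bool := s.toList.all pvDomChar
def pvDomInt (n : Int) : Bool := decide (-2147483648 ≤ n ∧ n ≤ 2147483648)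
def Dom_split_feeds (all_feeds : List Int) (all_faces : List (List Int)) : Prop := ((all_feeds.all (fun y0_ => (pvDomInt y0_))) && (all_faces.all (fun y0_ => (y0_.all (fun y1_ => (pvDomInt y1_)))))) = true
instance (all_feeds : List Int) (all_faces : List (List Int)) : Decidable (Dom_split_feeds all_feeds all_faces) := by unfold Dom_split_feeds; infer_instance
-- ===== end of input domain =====

-- B discards A's prefix-sum/index machinery entirely: it zips each face group against one
-- iterator over the feeds (objective: alternative; same return value on all inputs).


-- ===== PORT A =====
-- counts = [len(faces) for faces in all_faces]; sum_now = 0; ends = [0];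
-- for i in range(len(counts)): sum_now += counts[i]; ends.append(sum_now)
-- return [all_feeds[ends[i-1]:ends[i]] for i in range(1, len(ends))]
def split_feeds (all_feeds : List Int) (all_faces : List (List Int)) : List (List Int) :=
  let counts : List Int := all_faces.map (fun faces => (faces.length : Int))
  let st := (PySem.List.pyRange 0 (counts.length : Int) 1).foldl
      (fun (st : Int × List Int) i =>
        let sum_now := st.1 + PySem.List.pyGetD counts i 0   -- counts[i]; i is always in range here
        (sum_now, st.2 ++ [sum_now])) (0, [0])
  let ends := st.2
  (PySem.List.pyRange 1 (ends.length : Int) 1).map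
    (fun i => PySem.List.slice all_feeds
        (some (PySem.List.pyGetD ends (i - 1) 0)) (some (PySem.List.pyGetD ends i 0)))

-- ===== PORT B =====
-- it = iter(all_feeds)
-- return [[feed for _, feed in zip(faces, it)] for faces in all_faces]
-- the iterator's remaining elements are the state threaded through the comprehension;
-- zip(faces, it) yields the pairs List.zip faces rest and advances it past the zipped feeds
def split_feeds_alt (all_feeds : List Int) (all_faces : List (List Int)) : List (List Int) :=
  (all_faces.foldl
    (fun (st : List (List Int) × List Int) faces =>
      (st.1 ++ [(faces.zip st.2).map (fun p => p.2)],
       st.2.drop (faces.zip st.2).length))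
    ([], all_feeds)).1

-- ===== PRECONDITION & SPEC =====
def Spec_split_feeds (all_feeds : List Int) (all_faces : List (List Int)) (out : List (List Int)) : Prop := out = split_feeds_alt all_feeds all_faces
instance (all_feeds : List Int) (all_faces : List (List Int)) (out : List (List Int)) : Decidable (Spec_split_feeds all_feeds all_faces out) := by unfold Spec_split_feeds; infer_instance

-- ===== CLAIM (what is proved, stated in full; the proofs are below) =====
def Claim_equal_split_feeds : Prop := ∀ (all_feeds : List Int) (all_faces : List (List Int)), Dom_split_feeds all_feeds all_faces → Spec_split_feeds all_feeds all_faces (split_feeds all_feeds all_faces)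

-- ===== LEMMAS AND PROOFS =====

-- partial-sum tail of A's 'ends' list, starting from offset s
def pvEnds (s : Int) : List Int → List Int
  | [] => []
  | c :: cs => (s + c) :: pvEnds (s + c) cs

-- the list of consecutive slices of all_feeds starting at (Nat) offset s
def pvChunks (all_feeds : List Int) (s : Nat) : List (List Int) → List (List Int)
  | [] => []
  | f :: fs =>
      PySem.List.slice all_feeds (some (s : Int)) (some ((s : Int) + (f.length : Int))) ::
        pvChunks all_feeds (s + f.length) fs

-- the chunks B produces from a remainder list
def pvChunksB (rest : List Int) : List (List Int) → List (List Int)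
  | [] => []
  | f :: fs => rest.take f.length :: pvChunksB (rest.drop f.length) fs

-- A's ends-building loop computes (s + Σcounts, es ++ pvEnds s counts)
theorem pvEndsFold (counts : List Int) : ∀ (s : Int) (es : List Int),
    counts.foldl (fun (st : Int × List Int) c =>
      let sum_now := st.1 + c
      (sum_now, st.2 ++ [sum_now])) (s, es)
      = (s + counts.sum, es ++ pvEnds s counts) := by
  induction counts with
  | nil => intro s es; simp [pvEnds]
  | cons c cs ih =>
      intro s es
      simp only [List.foldl_cons, pvEnds, List.sum_cons, ih]
      simp [add_assoc]

-- zipping a group against the remainder and keeping the feeds is taking a front chunk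
theorem pvZipSnd (f : List Int) : ∀ (rest : List Int),
    (f.zip rest).map (fun p => p.2) = rest.take f.length := by
  induction f with
  | nil => intro rest; simp
  | cons a f ih =>
      intro rest
      cases rest with
      | nil => simp
      | cons r rest => simp [List.zip_cons_cons, ih]

theorem pvZipLen (f : List Int) : ∀ (rest : List Int),
    rest.drop (f.zip rest).length = rest.drop f.length := by
  intro rest
  rcases Nat.le_total f.length rest.length with h | h
  · rw [List.length_zip, Nat.min_eq_left h]
  · rw [List.length_zip, Nat.min_eq_right h,
        List.drop_of_length_le h, List.drop_of_length_le (le_refl _)]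

-- B's loop computes (res ++ pvChunksB rest fs, the remainder after all groups)
theorem pvAltFold (fs : List (List Int)) :
    ∀ (rest : List Int) (res : List (List Int)),
    fs.foldl (fun (st : List (List Int) × List Int) faces =>
        (st.1 ++ [(faces.zip st.2).map (fun p => p.2)],
         st.2.drop (faces.zip st.2).length))
      (res, rest)
      = (res ++ pvChunksB rest fs, rest.drop ((fs.map List.length).sum)) := by
  induction fs with
  | nil => intro rest res; simp [pvChunksB]
  | cons f fs ih =>
      intro rest res
      rw [List.foldl_cons, ih, pvZipLen]
      simp [pvChunksB, pvZipSnd, List.drop_drop]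

-- consecutive slices at running offsets are the chunks of the remainder list
theorem pvChunks_eq_chunksB (all_feeds : List Int) (fs : List (List Int)) : ∀ (s : Nat),
    pvChunks all_feeds s fs = pvChunksB (all_feeds.drop s) fs := by
  induction fs with
  | nil => intro s; rfl
  | cons f fs ih =>
      intro s
      simp only [pvChunks, pvChunksB, PySem.List.slice_natCast_add, ih (s + f.length),
        List.drop_drop]

-- the slicing comprehension over the ends table equals the running-offset chunks
theorem pvMain (all_feeds : List Int) (fs : List (List Int)) : ∀ (s : Nat),
    (List.range fs.length).map (fun k =>
        PySem.List.slice all_feeds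
          (some (((s : Int) :: pvEnds (s : Int) (fs.map (fun f => (f.length : Int)))).getD k 0))
          (some (((s : Int) :: pvEnds (s : Int) (fs.map (fun f => (f.length : Int)))).getD (k + 1) 0)))
      = pvChunks all_feeds s fs := by
  induction fs with
  | nil => intro s; simp [pvChunks]
  | cons f fs ih =>
      intro s
      rw [List.length_cons, List.range_succ_eq_map, List.map_cons, List.map_map]
      simp only [List.map_cons, pvEnds, pvChunks, List.getD_cons_zero, List.getD_cons_succ]
      refine congrArg₂ _ rfl ?_
      have h := ih (s + f.length)
      rw [show ((s + f.length : Nat) : Int) = (s : Int) + (f.length : Int) by push_cast; ring] at h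
      exact h

theorem split_feeds_eq (all_feeds : List Int) (all_faces : List (List Int)) :
    split_feeds all_feeds all_faces = split_feeds_alt all_feeds all_faces := by
  unfold split_feeds split_feeds_alt
  dsimp only
  rw [PySem.List.foldl_pyRange_zero_pyGetD'
        (all_faces.map (fun faces => (faces.length : Int))) 0
        (fun (st : Int × List Int) c =>
          let sum_now := st.1 + c
          (sum_now, st.2 ++ [sum_now])) (0, [0])]
  rw [pvEndsFold, pvAltFold]
  simp only [List.nil_append, List.singleton_append]
  set ends := (0 : Int) :: pvEnds 0 (all_faces.map (fun f => (f.length : Int))) with hends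
  have hlen : ∀ (s : Int) (cs : List Int), (pvEnds s cs).length = cs.length := by
    intro s cs
    induction cs generalizing s with
    | nil => rfl
    | cons c cs ih => simp [pvEnds, ih]
  have hlen2 : ends.length = all_faces.length + 1 := by
    simp [hends, hlen]
  rw [show ((ends.length : Int)) = 1 + (all_faces.length : Int) by rw [hlen2]; push_cast; ring]
  rw [show (PySem.List.pyRange 1 (1 + (all_faces.length : Int)) 1)
        = (List.range all_faces.length).map (fun (k : Nat) => 1 + (k : Int)) by
      rw [PySem.List.pyRange_one,
          show ((1 : Int) + (all_faces.length : Int) - 1).toNat = all_faces.length from by omega]]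
  rw [List.map_map]
  have hch := pvChunks_eq_chunksB all_feeds all_faces 0
  rw [List.drop_zero] at hch
  rw [← hch, ← pvMain all_feeds all_faces 0]
  apply List.map_congr_left
  intro k hk
  simp only [Function.comp_apply]
  have h1 : (1 : Int) + (k : Int) - 1 = ((k : Nat) : Int) := by ring
  have h2 : (1 : Int) + (k : Int) = (((k + 1 : Nat)) : Int) := by push_cast; ring
  rw [h1, h2, PySem.List.pyGetD_natCast, PySem.List.pyGetD_natCast]
  simp [hends]

-- ===== VERDICT (by name: the statement is the Claim_ definition above) =====
theorem split_feeds_spec : Claim_equal_split_feeds := by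
  intro all_feeds all_faces _
  unfold Spec_split_feeds
  exact split_feeds_eq all_feeds all_faces
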